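-- pv_equiv track=rewrite | github.com/PJGV333/Chemuson | src/chemname/template_match.py | _mapping_is_exact
-- ===== SOURCE A (Python) =====
-- from typing import Dict, Iterable, List
--
-- def _mapping_is_exact(
--     mapping: Dict[int, int],
--     bonded_pairs: set[tuple[int, int]],
--     mol_bonds: Dict[tuple[int, int], tuple[int, bool]],
-- ) -> bool:
--     """Verifica que el mapeo respete exactamente enlaces y no-enlaces."""
--     t_indices = list(mapping.keys())
--     for i in range(len(t_indices)):
--         for j in range(i + 1, len(t_indices)):
--             t_a = t_indices[i]
--             t_b = t_indices[j]
--             pair = (t_a, t_b) if t_a < t_b else (t_b, t_a)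
--             m_a = mapping[t_a]
--             m_b = mapping[t_b]
--             m_pair = (m_a, m_b) if m_a < m_b else (m_b, m_a)
--             if pair in bonded_pairs:
--                 if m_pair not in mol_bonds:
--                     return False
--             else:
--                 if m_pair in mol_bonds:
--                     return False
--     return True
-- ===== SOURCE B (Python) =====
-- def _mapping_is_exact(mapping, bonded_pairs, mol_bonds):
--     """Edge-driven check: walk the bonded edges and the molecule-bond keys
--     (via an inverse value->keys index) instead of all index pairs."""
--     inv = {}
--     for t, m in mapping.items():
--         inv.setdefault(m, []).append(t)
--     # every bonded template pair must map onto a molecule bond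
--     for a, b in bonded_pairs:
--         if a < b and a in mapping and b in mapping:
--             ma, mb = mapping[a], mapping[b]
--             mp = (ma, mb) if ma < mb else (mb, ma)
--             if mp not in mol_bonds:
--                 return False
--     # every molecule bond hit by a mapped pair must come from a bonded template pair
--     for u, v in mol_bonds:
--         if u < v:
--             for a in inv.get(u, []):
--                 for b in inv.get(v, []):
--                     sp = (a, b) if a < b else (b, a)
--                     if sp not in bonded_pairs:
--                         return False
--         elif u == v:
--             group = inv.get(u, [])
--             for i, a in enumerate(group):
--                 for b in group[i + 1:]:
--                     sp = (a, b) if a < b else (b, a)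
--                     if sp not in bonded_pairs:
--                         return False
--     return True
-- ===== Notes on version B (the rewrite author's own statement) =====
-- stated objective: alternative
-- what changed: A scans all pairs of template indices; B instead makes one pass over the bonded template edges and one pass over the molecule-bond keys via an inverse value-to-keys index, never enumerating non-bonded pairs.
import Mathlib
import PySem

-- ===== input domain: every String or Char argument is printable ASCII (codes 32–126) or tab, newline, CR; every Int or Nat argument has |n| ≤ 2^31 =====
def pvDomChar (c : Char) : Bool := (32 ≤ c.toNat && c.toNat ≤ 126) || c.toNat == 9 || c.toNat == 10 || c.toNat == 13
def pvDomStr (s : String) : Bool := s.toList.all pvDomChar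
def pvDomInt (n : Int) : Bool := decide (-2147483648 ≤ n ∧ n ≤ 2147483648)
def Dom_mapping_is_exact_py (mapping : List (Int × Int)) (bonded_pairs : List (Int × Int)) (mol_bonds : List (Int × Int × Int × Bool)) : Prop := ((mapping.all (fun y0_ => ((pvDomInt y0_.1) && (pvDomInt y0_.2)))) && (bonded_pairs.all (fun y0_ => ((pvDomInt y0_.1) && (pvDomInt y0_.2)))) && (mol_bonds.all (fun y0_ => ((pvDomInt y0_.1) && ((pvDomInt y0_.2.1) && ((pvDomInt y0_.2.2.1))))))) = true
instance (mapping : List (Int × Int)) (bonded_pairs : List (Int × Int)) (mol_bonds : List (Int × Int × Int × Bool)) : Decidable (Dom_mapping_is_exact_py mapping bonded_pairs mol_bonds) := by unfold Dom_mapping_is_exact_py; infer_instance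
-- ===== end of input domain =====

-- B replaces A's scan over all index pairs with an edge-driven check over the bonded set and the
-- molecule-bond keys (via an inverse value→keys index); an alternative algorithm, same return value.

-- ===== PORT A =====
-- key list of the mol_bonds dict (Python `m_pair in mol_bonds` is key membership)
def pvMolKeys (mol_bonds : List (Int × Int × Int × Bool)) : List (Int × Int) :=
  mol_bonds.map (fun q => (q.1, q.2.1))

-- literal port of A's nested index loops; `mapping[t]` is ported as getD with an unreachable
-- default 0 (t is always a key of mapping, so Python's lookup never raises)
def mapping_is_exact_py (mapping : List (Int × Int)) (bonded_pairs : List (Int × Int)) (mol_bonds : List (Int × Int × Int × Bool)) : Bool :=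
  let t_indices := mapping.map Prod.fst
  (PySem.List.pyRange 0 (t_indices.length : Int) 1).all fun i =>
    (PySem.List.pyRange (i + 1) (t_indices.length : Int) 1).all fun j =>
      let t_a := PySem.List.pyGetD t_indices i 0
      let t_b := PySem.List.pyGetD t_indices j 0
      let pair := if t_a < t_b then (t_a, t_b) else (t_b, t_a)
      let m_a := (PySem.Dict.mk mapping).getD t_a 0
      let m_b := (PySem.Dict.mk mapping).getD t_b 0
      let m_pair := if m_a < m_b then (m_a, m_b) else (m_b, m_a)
      if bonded_pairs.contains pair then (pvMolKeys mol_bonds).contains m_pair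
      else !((pvMolKeys mol_bonds).contains m_pair)

-- ===== PORT B =====
-- Source B's `for i, a in enumerate(group): for b in group[i+1:]`
def pvPairsAll (f : Int → Int → Bool) : List Int → Bool
  | [] => true
  | a :: rest => (rest.all fun b => f a b) && pvPairsAll f rest

def mapping_is_exact_py_alt (mapping : List (Int × Int)) (bonded_pairs : List (Int × Int)) (mol_bonds : List (Int × Int × Int × Bool)) : Bool :=
  -- inv = {}; for t, m in mapping.items(): inv.setdefault(m, []).append(t)
  let inv := (mapping.map (fun q => (q.2, q.1))).foldl
    (fun d q => d.modify q.1 ([] : List Int) (· ++ [q.2])) PySem.Dict.empty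
  let md := PySem.Dict.mk mapping
  let bondOk := bonded_pairs.all fun p =>
    if p.1 < p.2 && md.contains p.1 && md.contains p.2 then
      let ma := md.getD p.1 0
      let mbv := md.getD p.2 0
      (pvMolKeys mol_bonds).contains (if ma < mbv then (ma, mbv) else (mbv, ma))
    else true
  let molOk := mol_bonds.all fun q =>
    let u := q.1
    let v := q.2.1
    if u < v then
      (inv.getD u []).all fun a => (inv.getD v []).all fun b =>
        bonded_pairs.contains (if a < b then (a, b) else (b, a))
    else if u == v then
      pvPairsAll (fun a b => bonded_pairs.contains (if a < b then (a, b) else (b, a))) (inv.getD u [])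
    else true
  bondOk && molOk

-- ===== PRECONDITION & SPEC =====
-- mapping is a Python dict: an association list with duplicate keys does not represent one
def Pre_mapping_is_exact_py (mapping : List (Int × Int)) (bonded_pairs : List (Int × Int)) (mol_bonds : List (Int × Int × Int × Bool)) : Prop :=
  (mapping.map Prod.fst).Nodup
instance (mapping : List (Int × Int)) (bonded_pairs : List (Int × Int)) (mol_bonds : List (Int × Int × Int × Bool)) : Decidable (Pre_mapping_is_exact_py mapping bonded_pairs mol_bonds) := by unfold Pre_mapping_is_exact_py; infer_instance
def pvWitness_mapping_is_exact_py : (List (Int × Int)) × (List (Int × Int)) × (List (Int × Int × Int × Bool)) :=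
  ([(1, 10), (2, 20)], [(1, 2)], [(10, 20, 1, true)])
def Spec_mapping_is_exact_py (mapping : List (Int × Int)) (bonded_pairs : List (Int × Int)) (mol_bonds : List (Int × Int × Int × Bool)) (out : Bool) : Prop := out = mapping_is_exact_py_alt mapping bonded_pairs mol_bonds
instance (mapping : List (Int × Int)) (bonded_pairs : List (Int × Int)) (mol_bonds : List (Int × Int × Int × Bool)) (out : Bool) : Decidable (Spec_mapping_is_exact_py mapping bonded_pairs mol_bonds out) := by unfold Spec_mapping_is_exact_py; infer_instance

-- ===== CLAIM (what is proved, stated in full; the proofs are below) =====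
def Claim_equal_mapping_is_exact_py : Prop := ∀ (mapping : List (Int × Int)) (bonded_pairs : List (Int × Int)) (mol_bonds : List (Int × Int × Int × Bool)), Dom_mapping_is_exact_py mapping bonded_pairs mol_bonds → Pre_mapping_is_exact_py mapping bonded_pairs mol_bonds → Spec_mapping_is_exact_py mapping bonded_pairs mol_bonds (mapping_is_exact_py mapping bonded_pairs mol_bonds)

-- ===== LEMMAS AND PROOFS =====

-- sorted pair, lookup, group of keys mapping to u (proof-side abbreviations)
def pvMP (a b : Int) : Int × Int := if a < b then (a, b) else (b, a)
def pvLook (mapping : List (Int × Int)) (t : Int) : Int := (PySem.Dict.mk mapping).getD t 0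
def pvGrp (mapping : List (Int × Int)) (u : Int) : List Int :=
  (mapping.filter (fun q => q.2 == u)).map Prod.fst
-- the per-pair condition both programs decide
def pvCond (mapping bonded_pairs : List (Int × Int)) (mk : List (Int × Int)) (a b : Int) : Prop :=
  pvMP a b ∈ bonded_pairs ↔ pvMP (pvLook mapping a) (pvLook mapping b) ∈ mk

lemma pvMP_symm (a b : Int) : pvMP a b = pvMP b a := by
  unfold pvMP; split_ifs with h1 h2 h2
  · omega
  · rfl
  · rfl
  · have : a = b := by omega
    subst this; rfl

lemma pvCond_symm (m bp mk : List (Int × Int)) : ∀ a b, pvCond m bp mk a b → pvCond m bp mk b a := by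
  intro a b h; unfold pvCond at *; rw [pvMP_symm b a, pvMP_symm (pvLook m b)]; exact h

lemma ite_not_true_iff (c x : Bool) : ((if c = true then x else !x) = true) ↔ (c = true ↔ x = true) := by
  revert c x; decide

lemma pvLook_eq (m : List (Int × Int)) (hn : (m.map Prod.fst).Nodup) {t v : Int} (h : (t, v) ∈ m) :
    pvLook m t = v := PySem.Dict.getD_of_mem_items (d := PySem.Dict.mk m) h hn 0

lemma mem_pvGrp (m : List (Int × Int)) (hn : (m.map Prod.fst).Nodup) (u a : Int) :
    a ∈ pvGrp m u ↔ a ∈ m.map Prod.fst ∧ pvLook m a = u := by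
  unfold pvGrp
  constructor
  · intro h
    obtain ⟨⟨a', v⟩, hmem, rfl⟩ := List.mem_map.mp h
    have hf := List.mem_filter.mp hmem
    have hv : v = u := by simpa using hf.2
    subst hv
    exact ⟨List.mem_map.mpr ⟨_, hf.1, rfl⟩, pvLook_eq m hn hf.1⟩
  · rintro ⟨ha, hl⟩
    obtain ⟨⟨a', v⟩, hmem, rfl⟩ := List.mem_map.mp ha
    have := pvLook_eq m hn hmem
    rw [this] at hl
    subst hl
    exact List.mem_map.mpr ⟨_, List.mem_filter.mpr ⟨hmem, by simp⟩, rfl⟩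

lemma nodup_pvGrp (m : List (Int × Int)) (hn : (m.map Prod.fst).Nodup) (u : Int) :
    (pvGrp m u).Nodup := by
  unfold pvGrp
  exact hn.sublist (List.Sublist.map Prod.fst List.filter_sublist)

lemma pvGrp_eq_inv (m : List (Int × Int)) (u : Int) :
    ((m.map (fun q => (q.2, q.1))).foldl
      (fun d q => d.modify q.1 ([] : List Int) (· ++ [q.2])) PySem.Dict.empty).getD u [] =
    pvGrp m u := by
  rw [PySem.Dict.getD_foldl_modify_append]
  unfold pvGrp
  simp [List.filter_map, List.map_map, Function.comp_def]

lemma pvPairsAll_iff (f : Int → Int → Bool) (l : List Int) :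
    pvPairsAll f l = true ↔ l.Pairwise (fun a b => f a b = true) := by
  induction l with
  | nil => simp [pvPairsAll]
  | cons a rest ih =>
    simp [pvPairsAll, List.pairwise_cons, ih, List.all_eq_true, and_comm]

lemma contains_mk_iff (m : List (Int × Int)) (t : Int) :
    (PySem.Dict.mk m).contains t = true ↔ t ∈ m.map Prod.fst :=
  PySem.Dict.contains_iff_mem_keys (PySem.Dict.mk m) t

-- A computes: the per-pair condition holds for every pair of distinct keys
lemma A_iff (m bp : List (Int × Int)) (mb : List (Int × Int × Int × Bool))
    (hn : (m.map Prod.fst).Nodup) :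
    mapping_is_exact_py m bp mb = true ↔
      ∀ a ∈ m.map Prod.fst, ∀ b ∈ m.map Prod.fst, a ≠ b →
        pvCond m bp (pvMolKeys mb) a b := by
  unfold mapping_is_exact_py
  simp only [List.all_eq_true, PySem.List.mem_pyRange_one]
  set keys := m.map Prod.fst with hkeys
  constructor
  · intro h
    have hpw : keys.Pairwise (fun a b => pvCond m bp (pvMolKeys mb) a b) := by
      rw [List.pairwise_iff_getElem]
      intro i j hi hj hij
      have h1 := h (i : Int) ⟨by positivity, by exact_mod_cast hi⟩ (j : Int)
        ⟨by exact_mod_cast hij, by exact_mod_cast hj⟩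
      rw [PySem.List.pyGetD_natCast, PySem.List.pyGetD_natCast] at h1
      rw [List.getD_eq_getElem _ _ hi, List.getD_eq_getElem _ _ hj] at h1
      rw [ite_not_true_iff] at h1
      unfold pvCond pvMP pvLook
      simpa [List.contains_iff_mem] using h1
    exact fun a ha b hb hne => List.Pairwise.forall (pvCond_symm m bp (pvMolKeys mb)) hpw ha hb hne
  · intro h i hi j hj
    have hpw : keys.Pairwise (fun a b => pvCond m bp (pvMolKeys mb) a b) := by
      refine hn.imp_of_mem ?_
      intro a b ha hb hne
      exact h a ha b hb hne
    rw [List.pairwise_iff_getElem] at hpw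
    have hin : i.toNat < keys.length := by omega
    have hjn : j.toNat < keys.length := by omega
    have hij : i.toNat < j.toNat := by omega
    have hc := hpw i.toNat j.toNat hin hjn hij
    have hi' : (i.toNat : Int) = i := Int.toNat_of_nonneg hi.1
    have hj' : (j.toNat : Int) = j := Int.toNat_of_nonneg (by omega)
    rw [← hi', ← hj', PySem.List.pyGetD_natCast, PySem.List.pyGetD_natCast,
      List.getD_eq_getElem _ _ hin, List.getD_eq_getElem _ _ hjn, ite_not_true_iff]
    unfold pvCond pvMP pvLook at hc
    simpa [List.contains_iff_mem] using hc

-- B computes: the bonded-edge pass and the mol-key pass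
lemma B_iff (m bp : List (Int × Int)) (mb : List (Int × Int × Int × Bool)) :
    mapping_is_exact_py_alt m bp mb = true ↔
      ((∀ p ∈ bp, p.1 < p.2 → p.1 ∈ m.map Prod.fst → p.2 ∈ m.map Prod.fst →
          pvMP (pvLook m p.1) (pvLook m p.2) ∈ pvMolKeys mb) ∧
       (∀ q ∈ mb, (q.1 < q.2.1 →
            ∀ a ∈ pvGrp m q.1, ∀ b ∈ pvGrp m q.2.1, pvMP a b ∈ bp) ∧
          (q.1 = q.2.1 →
            (pvGrp m q.1).Pairwise (fun a b => pvMP a b ∈ bp)))) := by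
  unfold mapping_is_exact_py_alt
  rw [Bool.and_eq_true]
  simp only [List.all_eq_true]
  apply and_congr
  · refine forall_congr' fun p => ?_
    refine imp_congr_right fun hp => ?_
    constructor
    · intro h hlt h1m h2m
      rw [if_pos (by simp [hlt, (contains_mk_iff m p.1).mpr h1m,
        (contains_mk_iff m p.2).mpr h2m])] at h
      exact List.contains_iff_mem.mp h
    · intro h
      by_cases hc : (decide (p.1 < p.2) && (PySem.Dict.mk m).contains p.1
          && (PySem.Dict.mk m).contains p.2) = true
      · rw [if_pos hc]
        simp only [Bool.and_eq_true, decide_eq_true_eq, contains_mk_iff] at hc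
        exact List.contains_iff_mem.mpr (h hc.1.1 hc.1.2 hc.2)
      · rw [if_neg hc]
  · refine forall_congr' fun q => ?_
    refine imp_congr_right fun hq => ?_
    constructor
    · intro h
      constructor
      · intro hlt a ha b hb
        rw [if_pos hlt, pvGrp_eq_inv m q.1, pvGrp_eq_inv m q.2.1] at h
        simp only [List.all_eq_true] at h
        exact List.contains_iff_mem.mp (h a ha b hb)
      · intro heq
        rw [if_neg (by omega), if_pos (by simp [heq]), pvGrp_eq_inv m q.1,
          pvPairsAll_iff] at h
        exact h.imp fun hx => List.contains_iff_mem.mp hx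
    · rintro ⟨hA, hB⟩
      by_cases hlt : q.1 < q.2.1
      · rw [if_pos hlt, pvGrp_eq_inv m q.1, pvGrp_eq_inv m q.2.1]
        simp only [List.all_eq_true]
        intro a ha b hb
        exact List.contains_iff_mem.mpr (hA hlt a ha b hb)
      · by_cases heq : q.1 = q.2.1
        · rw [if_neg hlt, if_pos (by simp [heq]), pvGrp_eq_inv m q.1, pvPairsAll_iff]
          exact (hB heq).imp fun hx => List.contains_iff_mem.mpr hx
        · rw [if_neg hlt, if_neg (by simp [heq])]

lemma pvMP_mem_case (a b : Int) : pvMP a b = (a, b) ∨ pvMP a b = (b, a) := by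
  unfold pvMP; split_ifs <;> simp

-- ===== VERDICT (by name: the statement is the Claim_ definition above) =====
theorem mapping_is_exact_py_spec : Claim_equal_mapping_is_exact_py := by
  intro m bp mb _ hpre
  unfold Spec_mapping_is_exact_py
  have hn : (m.map Prod.fst).Nodup := hpre
  rw [Bool.eq_iff_iff, A_iff m bp mb hn, B_iff m bp mb]
  set keys := m.map Prod.fst with hkeys
  set mk := pvMolKeys mb with hmk
  constructor
  · intro h
    refine ⟨?_, ?_⟩
    · intro p hp hlt h1m h2m
      have hne : p.1 ≠ p.2 := by omega
      have hc := h p.1 h1m p.2 h2m hne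
      unfold pvCond at hc
      have hmp : pvMP p.1 p.2 = p := by unfold pvMP; rw [if_pos hlt]
      exact hc.mp (by rw [hmp]; exact hp)
    · intro q hq
      have hkey : (q.1, q.2.1) ∈ mk := by
        rw [hmk]; unfold pvMolKeys; exact List.mem_map.mpr ⟨q, hq, rfl⟩
      constructor
      · intro hlt a ha b hb
        rw [mem_pvGrp m hn] at ha hb
        have hne : a ≠ b := by
          intro hab; rw [hab, hb.2] at ha; omega
        have hc := h a ha.1 b hb.1 hne
        unfold pvCond at hc
        refine hc.mpr ?_
        have : pvMP (pvLook m a) (pvLook m b) = (q.1, q.2.1) := by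
          rw [ha.2, hb.2]; unfold pvMP; rw [if_pos hlt]
        rw [this]; exact hkey
      · intro heq
        have hnd := nodup_pvGrp m hn q.1
        refine hnd.imp_of_mem ?_
        intro a b ha hb hne
        rw [mem_pvGrp m hn] at ha hb
        have hc := h a ha.1 b hb.1 hne
        refine hc.mpr ?_
        have : pvMP (pvLook m a) (pvLook m b) = (q.1, q.2.1) := by
          rw [ha.2, hb.2, ← heq]; unfold pvMP; rw [if_neg (by omega)]
        rw [this]; exact hkey
  · rintro ⟨h1, h2⟩ a ha b hb hne
    unfold pvCond
    constructor
    · intro hbp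
      rcases pvMP_mem_case a b with hcase | hcase
      · have hlt : a < b := by
          by_contra hlt
          unfold pvMP at hcase
          rw [if_neg hlt] at hcase
          have : b = a ∧ a = b := by exact ⟨congrArg Prod.fst hcase, congrArg Prod.snd hcase⟩
          omega
        have := h1 (a, b) (by rwa [hcase] at hbp) hlt ha hb
        simpa [pvMP] using this
      · have hlt : b < a := by
          unfold pvMP at hcase
          split_ifs at hcase with hab
          · have : a = b ∧ b = a := ⟨congrArg Prod.fst hcase, congrArg Prod.snd hcase⟩
            omega
          · omega
        have := h1 (b, a) (by rwa [hcase] at hbp) hlt hb ha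
        rw [pvMP_symm (pvLook m b)] at this
        exact this
    · intro hmem
      obtain ⟨q, hq, hqe⟩ := List.mem_map.mp (by rw [hmk] at hmem; exact hmem)
      rw [Prod.mk.injEq] at hqe
      obtain ⟨hq1, hq2⟩ := hqe    -- q.1 = min look, q.2.1 = max look
      obtain ⟨hA, hB⟩ := h2 q hq
      by_cases hequ : pvLook m a = pvLook m b
      · -- m_pair is (u,u): the within-group pairwise pass covers {a,b}
        have hmm : pvMP (pvLook m a) (pvLook m b) = (pvLook m a, pvLook m a) := by
          rw [← hequ]; unfold pvMP; rw [if_neg (by omega)]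
        rw [hmm] at hq1 hq2
        simp only at hq1 hq2
        have hpw := hB (by omega)
        have hga : a ∈ pvGrp m q.1 := (mem_pvGrp m hn q.1 a).mpr ⟨ha, hq1.symm⟩
        have hgb : b ∈ pvGrp m q.1 := (mem_pvGrp m hn q.1 b).mpr ⟨hb, by rw [← hequ, hq1]⟩
        have hsym : ∀ x y : Int, pvMP x y ∈ bp → pvMP y x ∈ bp := by
          intro x y hxy; rwa [pvMP_symm]
        exact List.Pairwise.forall (R := fun x y => pvMP x y ∈ bp) hsym hpw hga hgb hne
      · rcases pvMP_mem_case (pvLook m a) (pvLook m b) with hcase | hcase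
        all_goals rw [hcase] at hq1 hq2
        all_goals simp only at hq1 hq2
        · -- orientation (look a, look b): look a < look b
          have hlt : pvLook m a < pvLook m b := by
            unfold pvMP at hcase
            split_ifs at hcase with hx
            · exact hx
            · have := congrArg Prod.fst hcase; simp only at this; omega
          exact hA (by omega) a ((mem_pvGrp m hn q.1 a).mpr ⟨ha, hq1.symm⟩)
            b ((mem_pvGrp m hn q.2.1 b).mpr ⟨hb, hq2.symm⟩)
        · -- orientation (look b, look a): look b < look a
          have hlt : pvLook m b < pvLook m a := by
            unfold pvMP at hcase
            split_ifs at hcase with hx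
            · have := congrArg Prod.fst hcase; simp only at this; omega
            · omega
          have := hA (by omega) b ((mem_pvGrp m hn q.1 b).mpr ⟨hb, hq1.symm⟩)
            a ((mem_pvGrp m hn q.2.1 a).mpr ⟨ha, hq2.symm⟩)
          rwa [pvMP_symm b a] at this
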